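-- pv_equiv track=rewrite | github.com/BradleyCharles/webappdevad320 | ad325/Week 3/test.py | removeOutdated
-- ===== SOURCE A (Python) =====
-- def removeOutdated(data,id):
--
--     if not data or not id or not isinstance(data, list):
--         return None
--
--     try:
--         length = len(data)
--         count = 0
--         index = 0
--
--         while index < length:
--             if data[index] == id:
--                     data.pop(index)
--                     data.append(0)
--                     length -=1
--             else:
--                 count +=1
--                 index +=1
--         return count
--     except:
--         return None
-- ===== SOURCE B (Python) =====
-- def removeOutdated(data, id):
--     if not data or not id or not isinstance(data, list):
--         return None
--     count = sum(1 for x in data if x != id)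
--     # same observable mutation as A: non-matches kept in order, zeros padded at the end
--     data[:] = [x for x in data if x != id] + [0] * (len(data) - count)
--     return count
-- ===== Notes on version B (the rewrite author's own statement) =====
-- stated objective: simpler
-- what changed: Replaces the mutating while loop that pops matching elements one by one (shifting the tail and adjusting length/index) with a single comprehension-based count and one rebuild of the list.
import Mathlib
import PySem

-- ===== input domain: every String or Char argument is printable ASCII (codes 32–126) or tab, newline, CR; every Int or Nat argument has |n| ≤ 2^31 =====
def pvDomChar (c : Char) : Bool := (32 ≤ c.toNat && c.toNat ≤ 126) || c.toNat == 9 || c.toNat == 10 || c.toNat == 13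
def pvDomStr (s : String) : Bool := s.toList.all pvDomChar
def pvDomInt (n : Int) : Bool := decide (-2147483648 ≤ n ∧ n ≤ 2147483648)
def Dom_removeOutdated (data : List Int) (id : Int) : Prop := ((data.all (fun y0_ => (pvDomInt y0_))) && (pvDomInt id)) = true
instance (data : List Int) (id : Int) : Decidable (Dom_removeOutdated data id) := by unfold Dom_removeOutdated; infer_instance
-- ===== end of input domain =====

-- ===== PORT A =====
-- Port of A (return value only; A also mutates `data` in place, B's Python performs the
-- same mutation; equivalence here is about the returned value).
-- The while loop: state (data, length, count, index); data.pop(index) is data.eraseIdx index,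
-- data.append(0) is ++ [0].  data[index]? = none mirrors an IndexError caught by the bare
-- except → None (unreachable while index < length ≤ data.length, but transliterated).
def removeOutdatedLoop (data : List Int) (id : Int) (len : Nat) (count : Int) (idx : Nat) :
    Option Int :=
  if _h : idx < len then
    match _e : data[idx]? with
    | none => none
    | some v =>
      if v = id then
        removeOutdatedLoop (data.eraseIdx idx ++ [0]) id (len - 1) count idx
      else
        removeOutdatedLoop data id len (count + 1) (idx + 1)
  else
    some count
termination_by len - idx
decreasing_by all_goals omega

def removeOutdated (data : List Int) (id : Int) : Option Int :=
  if data = [] ∨ id = 0 then none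
  else removeOutdatedLoop data id data.length 0 0

-- ===== PORT B =====
def removeOutdated_alt (data : List Int) (id : Int) : Option Int :=
  if data = [] ∨ id = 0 then none
  else some ((data.filter (fun x => x ≠ id)).length : Int)

-- ===== PRECONDITION & SPEC =====
def Spec_removeOutdated (data : List Int) (id : Int) (out : Option Int) : Prop := out = removeOutdated_alt data id
instance (data : List Int) (id : Int) (out : Option Int) : Decidable (Spec_removeOutdated data id out) := by unfold Spec_removeOutdated; infer_instance

-- ===== CLAIM (what is proved, stated in full; the proofs are below) =====
def Claim_equal_removeOutdated : Prop := ∀ (data : List Int) (id : Int), Dom_removeOutdated data id → Spec_removeOutdated data id (removeOutdated data id)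

-- ===== LEMMAS AND PROOFS =====

-- Loop invariant: the loop returns count plus the number of non-id elements of the
-- still-unscanned segment data[idx:len].
theorem removeOutdatedLoop_eq (data : List Int) (id : Int) (len : Nat) (count : Int)
    (idx : Nat) (hil : idx ≤ len) (hld : len ≤ data.length) :
    removeOutdatedLoop data id len count idx =
      some (count + (((data.drop idx).take (len - idx)).filter (fun x => x ≠ id)).length) := by
  induction data, len, count, idx using removeOutdatedLoop.induct (id := id) with
  | case1 data len count idx h e =>
    -- data[idx]? = none contradicts idx < len ≤ data.length
    exact absurd e (by simp [List.getElem?_eq_getElem (by omega : idx < data.length)])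
  | case2 data len count idx h e ih =>
    have hidx : idx < data.length := by omega
    have hdropE : (data.eraseIdx idx ++ [0]).drop idx = data.drop (idx + 1) ++ [0] := by
      rw [List.eraseIdx_eq_take_drop_succ, List.append_assoc,
          List.drop_append_of_le_length (by simp; omega)]
      simp
    have hdrop : data.drop idx = data[idx] :: data.drop (idx + 1) :=
      List.drop_eq_getElem_cons hidx
    have hv' : data[idx] = id := by
      have h2 : data[idx]? = some data[idx] := List.getElem?_eq_getElem hidx
      rw [e] at h2; injection h2 with h3; omega
    rw [removeOutdatedLoop]
    simp only [dif_pos h]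
    split
    next heq => rw [e] at heq; cases heq
    next v heq =>
      rw [e] at heq; injection heq with hv2
      rw [if_pos hv2.symm,
          ih (by omega) (by simp [List.length_eraseIdx, hidx]; omega)]
      congr 2
      rw [hdropE, hdrop, List.take_append_of_le_length (by simp; omega)]
      have hlen : len - idx = (len - 1 - idx) + 1 := by omega
      rw [hlen, List.take_succ_cons, List.filter_cons]
      simp [hv']
  | case3 data len count idx h v e hv ih =>
    have hidx : idx < data.length := by omega
    have hdrop : data.drop idx = data[idx] :: data.drop (idx + 1) :=
      List.drop_eq_getElem_cons hidx
    have hv' : data[idx] = v := by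
      have h2 : data[idx]? = some data[idx] := List.getElem?_eq_getElem hidx
      rw [e] at h2; injection h2 with h3; omega
    rw [removeOutdatedLoop]
    simp only [dif_pos h]
    split
    next heq => rw [e] at heq; cases heq
    next w heq =>
      rw [e] at heq; injection heq with hv2
      rw [if_neg (hv2 ▸ hv), ih (by omega) hld]
      have hlen : len - idx = (len - (idx + 1)) + 1 := by omega
      rw [hdrop, hlen, List.take_succ_cons, List.filter_cons]
      simp [hv', hv]
      ring
  | case4 data len count idx h =>
    rw [removeOutdatedLoop]
    have h0 : len - idx = 0 := by omega
    simp [dif_neg h, h0]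

-- ===== VERDICT (by name: the statement is the Claim_ definition above) =====
theorem removeOutdated_spec : Claim_equal_removeOutdated := by
  intro data id _
  unfold Spec_removeOutdated removeOutdated removeOutdated_alt
  split
  · rfl
  · rw [removeOutdatedLoop_eq data id data.length 0 0 (Nat.zero_le _) le_rfl]
    simp
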